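-- pv_equiv track=rewrite | github.com/leeroywking/simple_replacement | simple_substitution/make_replacements.py | format_word
-- ===== SOURCE A (Python) =====
-- def format_word(word):
--     """
--     takes in a word and returns a replaces letters in format where
--     apple -> 01123
--     """
--     output = ""
--     letter_dict = {}
--     count = 0
--     for letter in word:
--         try:
--             output += f"{letter_dict[letter]}"
--         except KeyError:
--             letter_dict[letter] = count
--             output += f"{count}"
--             count += 1
--
--     return output
-- ===== SOURCE B (Python) =====
-- def format_word(word):
--     """
--     takes in a word and returns a replaces letters in format where
--     apple -> 01123
--     """
--     # each letter's code = number of distinct letters before its first occurrence,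
--     # computed once per distinct letter by a closed formula (no running counter)
--     code = {c: str(len(set(word[:word.find(c)]))) for c in set(word)}
--     return "".join(code[c] for c in word)
-- ===== Notes on version B (the rewrite author's own statement) =====
-- stated objective: alternative
-- what changed: Removed the stateful single pass (lazy try/except dict with a running counter interleaved with output building): B computes each distinct letter's code independently by a closed formula - the number of distinct letters in the prefix before its first occurrence (word.find + set of prefix slice) - and then maps every position through these precomputed codes.
import Mathlib
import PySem

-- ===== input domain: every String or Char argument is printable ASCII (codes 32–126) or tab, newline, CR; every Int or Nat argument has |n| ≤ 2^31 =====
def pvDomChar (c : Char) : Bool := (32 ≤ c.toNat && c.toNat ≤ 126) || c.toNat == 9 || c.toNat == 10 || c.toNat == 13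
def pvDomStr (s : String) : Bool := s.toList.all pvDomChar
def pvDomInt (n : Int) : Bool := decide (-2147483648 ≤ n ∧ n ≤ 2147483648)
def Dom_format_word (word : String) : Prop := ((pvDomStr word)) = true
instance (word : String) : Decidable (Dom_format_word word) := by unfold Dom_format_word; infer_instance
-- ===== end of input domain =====

-- B removes A's stateful index table (lazy dict + running counter) entirely: each letter's code is
-- computed independently as the number of distinct letters before its first occurrence (find + set of prefix).

-- ===== PORT A =====
-- A's loop: state (output, letter_dict, count); try d[letter] / except KeyError ported as match on get?.
-- output is carried as List Char (PySem convention: String building via lists), returned via String.ofList.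
def formatWordStep (st : List Char × PySem.Dict Char Int × Int) (letter : Char) :
    List Char × PySem.Dict Char Int × Int :=
  match st.2.1.get? letter with
  | some v => (st.1 ++ (PySem.Int.toStr v).toList, st.2.1, st.2.2)
  | none => (st.1 ++ (PySem.Int.toStr st.2.2).toList, st.2.1.insert letter st.2.2, st.2.2 + 1)

def format_word (word : String) : String :=
  String.ofList (word.toList.foldl formatWordStep ([], PySem.Dict.empty, 0)).1

-- ===== PORT B =====
-- code = {c: str(len(set(word[:word.find(c)]))) for c in set(word)}; then "".join(code[c] for c in word).
-- set(...) → PySem.Set.ofList, word.find(c) → PySem.Chars.find, word[:i] → PySem.Chars.slice,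
-- dict comprehension → foldl of inserts, code[c] (key always present) → (get? c).getD "".
def format_word_alt (word : String) : String :=
  let code : PySem.Dict Char String :=
    (PySem.Set.ofList word.toList).foldl
      (fun d c => d.insert c (PySem.Int.toStr ((PySem.Set.ofList
        (PySem.Chars.slice word.toList none (some (PySem.Chars.find word.toList [c])))).length : Int)))
      PySem.Dict.empty
  PySem.Str.join "" (word.toList.map (fun c => (code.get? c).getD ""))

-- ===== PRECONDITION & SPEC =====
def Spec_format_word (word : String) (out : String) : Prop := out = format_word_alt word
instance (word : String) (out : String) : Decidable (Spec_format_word word out) := by unfold Spec_format_word; infer_instance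

-- ===== CLAIM (what is proved, stated in full; the proofs are below) =====
def Claim_equal_format_word : Prop := ∀ (word : String), Dom_format_word word → Spec_format_word word (format_word word)

-- ===== LEMMAS AND PROOFS =====

-- first-occurrence index of c in u, counting from i (the characterisation of A's table)
def idxFrom (u : List Char) (i : Int) (c : Char) : Option Int :=
  match u with
  | [] => none
  | x :: t => if x = c then some i else idxFrom t (i + 1) c

theorem idxFrom_eq_none_iff (u : List Char) (i : Int) (c : Char) :
    idxFrom u i c = none ↔ c ∉ u := by
  induction u generalizing i with
  | nil => simp [idxFrom]
  | cons x t ih =>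
    by_cases h : x = c
    · simp [idxFrom, h]
    · simp only [idxFrom, h, if_false, ih, List.mem_cons, not_or]
      exact ⟨fun ht => ⟨fun he => h he.symm, ht⟩, fun ⟨_, ht⟩ => ht⟩

theorem idxFrom_append_of_mem (s t : List Char) (i : Int) (c : Char) (h : c ∈ s) :
    idxFrom (s ++ t) i c = idxFrom s i c := by
  induction s generalizing i with
  | nil => simp at h
  | cons x r ih =>
    by_cases hx : x = c
    · simp [idxFrom, hx]
    · simp only [List.cons_append, idxFrom, hx, if_false]
      exact ih _ ((List.mem_cons.mp h).resolve_left fun he => hx he.symm)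

theorem idxFrom_append_cons_self (s t : List Char) (i : Int) (c : Char) (h : c ∉ s) :
    idxFrom (s ++ c :: t) i c = some (i + s.length) := by
  induction s generalizing i with
  | nil => simp [idxFrom]
  | cons x r ih =>
    have hx : x ≠ c := fun he => h (he ▸ List.mem_cons_self)
    simp only [List.cons_append, idxFrom, hx, if_false]
    rw [ih _ (fun hm => h (List.mem_cons_of_mem _ hm))]
    simp; ring

theorem idxFrom_append_singleton (s : List Char) (i : Int) (c c' : Char) (hc : c ∉ s) :
    idxFrom (s ++ [c]) i c' =
      if c' = c then some (i + s.length) else idxFrom s i c' := by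
  by_cases h : c' = c
  · subst h; simp [idxFrom_append_cons_self s [] i c' hc]
  · simp only [h, if_false]
    by_cases hm : c' ∈ s
    · exact idxFrom_append_of_mem s [c] i c' hm
    · rw [(idxFrom_eq_none_iff s i c').mpr hm, (idxFrom_eq_none_iff _ i c').mpr]
      simp [hm, h]

-- the rendering of one letter relative to the first-occurrence table of word w
def renderChar (w : List Char) (c : Char) : List Char :=
  (PySem.Int.toStr ((idxFrom (PySem.List.dedup w) 0 c).getD 0)).toList

theorem dedup_append (s t : List Char) :
    PySem.List.dedup (s ++ t) =
      PySem.List.dedup s ++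
        List.filter (fun y => !(PySem.Set.ofList s).contains y) (PySem.Set.ofList t) := by
  simp only [PySem.List.dedup_eq_ofList, PySem.Set.ofList_append,
    PySem.Set.update_eq_append_filter]

theorem dedup_append_singleton_of_mem (s : List Char) (c : Char) (h : c ∈ s) :
    PySem.List.dedup (s ++ [c]) = PySem.List.dedup s := by
  simp only [PySem.List.dedup_eq_ofList, PySem.Set.ofList_append_singleton]
  exact PySem.Set.add_of_mem ((PySem.Set.mem_ofList s c).mpr h)

theorem dedup_append_singleton_of_not_mem (s : List Char) (c : Char) (h : c ∉ s) :
    PySem.List.dedup (s ++ [c]) = PySem.List.dedup s ++ [c] := by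
  simp only [PySem.List.dedup_eq_ofList, PySem.Set.ofList_append_singleton]
  exact PySem.Set.add_of_not_mem (fun hm => h ((PySem.Set.mem_ofList s c).mp hm))

-- A's loop invariant: given the dict is the first-occurrence table of the processed prefix `seen`
-- and the counter is its number of distinct letters, the loop appends the rendering of `rest`.
theorem loopA (w : List Char) : ∀ (rest seen out : List Char) (d : PySem.Dict Char Int),
    w = seen ++ rest →
    (∀ c, d.get? c = idxFrom (PySem.List.dedup seen) 0 c) →
    (rest.foldl formatWordStep (out, d, ((PySem.List.dedup seen).length : Int))).1
      = out ++ (rest.map (renderChar w)).flatten := by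
  intro rest
  induction rest with
  | nil => intro seen out d _ _; simp
  | cons c rest' ih =>
    intro seen out d hw hd
    by_cases hc : c ∈ seen
    · -- letter already seen: dict hit
      have hmem : c ∈ PySem.List.dedup seen := by
        simp [PySem.List.dedup_eq_ofList, PySem.Set.mem_ofList]; exact hc
      obtain ⟨v, hv⟩ : ∃ v, idxFrom (PySem.List.dedup seen) 0 c = some v := by
        cases h : idxFrom (PySem.List.dedup seen) 0 c with
        | none => exact absurd hmem ((idxFrom_eq_none_iff _ _ _).mp h)
        | some v => exact ⟨v, rfl⟩
      have hrc : renderChar w c = (PySem.Int.toStr v).toList := by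
        rw [renderChar, hw, dedup_append, idxFrom_append_of_mem _ _ _ _ hmem, hv]
        rfl
      have hstep : formatWordStep (out, d, ((PySem.List.dedup seen).length : Int)) c
          = (out ++ (PySem.Int.toStr v).toList, d, ((PySem.List.dedup seen).length : Int)) := by
        simp only [formatWordStep, hd c, hv]
      rw [List.foldl_cons, hstep]
      have hded := (dedup_append_singleton_of_mem seen c hc).symm
      have := ih (seen ++ [c]) (out ++ (PySem.Int.toStr v).toList) d
        (by rw [hw, List.append_assoc]; rfl)
        (by intro c'; rw [hd c', ← hded])
      rw [← hded] at this
      rw [this, List.map_cons, List.flatten_cons, hrc, List.append_assoc]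
    · -- new letter: KeyError branch
      have hnm : c ∉ PySem.List.dedup seen := by
        simp [PySem.List.dedup_eq_ofList, PySem.Set.mem_ofList]; exact hc
      have hnone : idxFrom (PySem.List.dedup seen) 0 c = none :=
        (idxFrom_eq_none_iff _ _ _).mpr hnm
      have hrc : renderChar w c
          = (PySem.Int.toStr ((PySem.List.dedup seen).length : Int)).toList := by
        rw [renderChar, hw]
        obtain ⟨t, ht⟩ : ∃ t, PySem.List.dedup (seen ++ c :: rest')
            = PySem.List.dedup seen ++ c :: t := by
          have h1 : seen ++ c :: rest' = (seen ++ [c]) ++ rest' := by simp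
          rw [h1, dedup_append, dedup_append_singleton_of_not_mem seen c hc]
          refine ⟨List.filter (fun y => !(PySem.Set.ofList (seen ++ [c])).contains y)
            (PySem.Set.ofList rest'), ?_⟩
          simp
        rw [ht, idxFrom_append_cons_self _ _ _ _ hnm]
        simp
      have hstep : formatWordStep (out, d, ((PySem.List.dedup seen).length : Int)) c
          = (out ++ (PySem.Int.toStr ((PySem.List.dedup seen).length : Int)).toList,
             d.insert c ((PySem.List.dedup seen).length : Int),
             ((PySem.List.dedup seen).length : Int) + 1) := by
        simp only [formatWordStep, hd c, hnone]
      rw [List.foldl_cons, hstep]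
      have hded := dedup_append_singleton_of_not_mem seen c hc
      have hlen : (((PySem.List.dedup (seen ++ [c])).length : Int))
          = ((PySem.List.dedup seen).length : Int) + 1 := by
        rw [hded]; simp
      have := ih (seen ++ [c])
        (out ++ (PySem.Int.toStr ((PySem.List.dedup seen).length : Int)).toList)
        (d.insert c ((PySem.List.dedup seen).length : Int))
        (by rw [hw, List.append_assoc]; rfl)
        (by
          intro c'
          rw [hded, idxFrom_append_singleton _ _ _ _ hnm, PySem.Dict.get?_insert, hd c']
          simp)
      rw [hlen] at this
      rw [this, List.map_cons, List.flatten_cons, hrc, List.append_assoc]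

-- c ∈ w splits w at its FIRST occurrence, located by Chars.find
theorem find_split (w : List Char) (c : Char) (hc : c ∈ w) :
    ∃ s t : List Char, w = s ++ c :: t ∧ c ∉ s ∧
      (PySem.Chars.find w [c]).toNat = s.length ∧ 0 ≤ PySem.Chars.find w [c] := by
  obtain ⟨s0, t0, hw0⟩ := List.append_of_mem hc
  have hinf : [c] <:+: w := ⟨s0, t0, by rw [hw0]; simp⟩
  have hnn : 0 ≤ PySem.Chars.find w [c] := (PySem.Chars.find_nonneg_iff w [c]).mpr hinf
  have hle : PySem.Chars.find w [c] ≤ w.length := PySem.Chars.find_le_length w [c]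
  obtain ⟨hpre, hmin⟩ := PySem.Chars.find_spec hnn
  set k := (PySem.Chars.find w [c]).toNat with hk
  obtain ⟨r, hr⟩ : ∃ r, w.drop k = c :: r := by
    obtain ⟨u, hu⟩ := hpre
    exact ⟨u, by simpa using hu.symm⟩
  have hkle : k ≤ w.length := by omega
  refine ⟨w.take k, r, ?_, ?_, ?_, hnn⟩
  · conv_lhs => rw [← List.take_append_drop k w]
    rw [hr]
  · intro hmem
    obtain ⟨i, hi, hget⟩ := List.getElem_of_mem hmem
    have hik : i < k := lt_of_lt_of_le hi (by simp)
    have hiw : i < w.length := lt_of_lt_of_le hik hkle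
    have : [c] <+: w.drop i := by
      refine ⟨w.drop (i + 1), ?_⟩
      rw [List.drop_eq_getElem_cons hiw]
      have : w[i] = c := by rw [← hget]; simp [List.getElem_take]
      simp [this]
    exact hmin i hik this
  · simp [hkle]

-- B's per-character formula computes the first-occurrence index
theorem idxFrom_split (s t : List Char) (c : Char) (hs : c ∉ s) :
    idxFrom (PySem.List.dedup (s ++ c :: t)) 0 c
      = some (((PySem.Set.ofList s).length : Int)) := by
  have hnm : c ∉ PySem.List.dedup s := by
    simp [PySem.List.dedup_eq_ofList, PySem.Set.mem_ofList]; exact hs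
  obtain ⟨r, hr⟩ : ∃ r, PySem.List.dedup (s ++ c :: t) = PySem.List.dedup s ++ c :: r := by
    have h1 : s ++ c :: t = (s ++ [c]) ++ t := by simp
    rw [h1, dedup_append, dedup_append_singleton_of_not_mem s c hs]
    refine ⟨List.filter (fun y => !(PySem.Set.ofList (s ++ [c])).contains y)
      (PySem.Set.ofList t), ?_⟩
    simp
  rw [hr, idxFrom_append_cons_self _ _ _ _ hnm]
  simp [PySem.List.dedup_eq_ofList]

-- dict built by inserting a key-determined value: lookup of a present key gives that value
theorem get?_foldl_insert_fun (f : Char → String) :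
    ∀ (u : List Char) (d : PySem.Dict Char String) (c : Char),
      ((u.foldl (fun d x => d.insert x (f x)) d).get? c)
        = if c ∈ u then some (f c) else d.get? c := by
  intro u
  induction u with
  | nil => intro d c; simp
  | cons x t ih =>
    intro d c
    rw [List.foldl_cons, ih]
    by_cases hct : c ∈ t
    · simp [hct]
    · by_cases hcx : c = x
      · subst hcx; simp [hct, PySem.Dict.get?_insert_self]
      · simp [hct, PySem.Dict.get?_insert, hcx]

theorem join_nil_flatten (l : List (List Char)) : PySem.Chars.join [] l = l.flatten := by
  induction l with
  | nil => rfl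
  | cons a t ih =>
    cases t with
    | nil => simp [PySem.Chars.join, List.intercalate]
    | cons b r =>
      simp only [PySem.Chars.join, List.intercalate] at *
      simp [List.intersperse] at *
      simp [ih]

-- ===== VERDICT (by name: the statement is the Claim_ definition above) =====
set_option maxHeartbeats 1000000 in
theorem format_word_spec : Claim_equal_format_word := by
  intro word _
  unfold Spec_format_word format_word format_word_alt
  apply String.toList_inj.mp
  have hA := loopA word.toList word.toList [] [] PySem.Dict.empty rfl (fun c => rfl)
  have h0 : ((PySem.List.dedup ([] : List Char)).length : Int) = 0 := rfl
  rw [h0, List.nil_append] at hA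
  rw [PySem.Str.toList_join]
  simp only [String.toList_ofList, hA, List.map_map]
  have hsep : ("" : String).toList = [] := rfl
  rw [hsep, join_nil_flatten]
  congr 1
  apply List.map_congr_left
  intro c hcmem
  obtain ⟨s, t, hw, hns, hlen, hnn⟩ := find_split word.toList c hcmem
  simp only [Function.comp]
  rw [get?_foldl_insert_fun]
  have hcset : c ∈ PySem.Set.ofList word.toList := (PySem.Set.mem_ofList _ _).mpr hcmem
  rw [if_pos hcset]
  unfold renderChar
  rw [PySem.Chars.slice_eq_listSlice, PySem.List.slice_to _ hnn, hlen]
  have htake : (word.toList).take s.length = s := by rw [hw]; simp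
  rw [htake]
  rw [hw, idxFrom_split s t c hns]
  rfl
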